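-- pv_equiv track=rewrite | github.com/liuweiqing02/BetterPPT | source/backend/app/workers/runner.py | _infer_slot_role
-- ===== SOURCE A (Python) =====
-- def _infer_slot_role(slot_key: str) -> str:
--     value = str(slot_key or '').lower()
--     if 'title' in value:
--         return 'title'
--     if 'subtitle' in value:
--         return 'subtitle'
--     if any(token in value for token in ('bullet', 'body', 'points', 'summary', 'agenda', 'list')):
--         return 'bullet'
--     if any(token in value for token in ('table', 'datatable', 'grid')):
--         return 'datatable'
--     if any(token in value for token in ('image', 'visual', 'hero', 'figure', 'photo', 'chart')):
--         return 'figure'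
--     return 'summary'
-- ===== SOURCE B (Python) =====
-- # Single pass over string positions keeping the minimum-priority token match,
-- # instead of an ordered cascade of substring-membership tests.
-- TOKEN_PRIORITY = {
--     'title': 0, 'subtitle': 1,
--     'bullet': 2, 'body': 2, 'points': 2, 'summary': 2, 'agenda': 2, 'list': 2,
--     'table': 3, 'datatable': 3, 'grid': 3,
--     'image': 4, 'visual': 4, 'hero': 4, 'figure': 4, 'photo': 4, 'chart': 4,
-- }
-- ROLES = ('title', 'subtitle', 'bullet', 'datatable', 'figure', 'summary')
--
--
-- def _infer_slot_role(slot_key: str) -> str: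
--     value = str(slot_key or '').lower()
--     best = 5
--     for i in range(len(value)):
--         for tok, p in TOKEN_PRIORITY.items():
--             if p < best and value.startswith(tok, i):
--                 best = p
--     return ROLES[best]
-- ===== Notes on version B (the rewrite author's own statement) =====
-- stated objective: alternative
-- what changed: Replaced the ordered cascade of substring-membership tests by a single left-to-right scan over the string's positions that keeps the minimum priority of any token matching at each position (via a token->priority dict) and indexes a role table with that minimum.
import Mathlib
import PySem

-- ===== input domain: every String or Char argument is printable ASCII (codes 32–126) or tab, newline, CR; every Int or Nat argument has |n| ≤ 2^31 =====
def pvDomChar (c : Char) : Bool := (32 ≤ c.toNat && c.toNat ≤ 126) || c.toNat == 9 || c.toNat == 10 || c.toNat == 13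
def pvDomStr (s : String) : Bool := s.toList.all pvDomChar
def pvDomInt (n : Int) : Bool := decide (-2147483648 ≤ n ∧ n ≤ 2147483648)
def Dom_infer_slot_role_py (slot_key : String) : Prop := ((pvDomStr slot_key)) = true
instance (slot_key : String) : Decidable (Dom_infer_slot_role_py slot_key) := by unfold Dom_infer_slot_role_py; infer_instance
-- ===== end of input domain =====

-- B replaces the ordered cascade of substring-membership tests by a single pass over the
-- string's positions that keeps the minimum-priority token matching there (alternative; same cost).

-- ===== PORT A =====
def infer_slot_role_py (slot_key : String) : String :=
  -- value = str(slot_key or '').lower()  ('slot_key or ""' is slot_key unless empty, then '')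
  let value := PySem.Str.lower (if slot_key == "" then "" else slot_key)
  if PySem.Str.isIn "title" value then "title"
  else if PySem.Str.isIn "subtitle" value then "subtitle"
  else if ["bullet", "body", "points", "summary", "agenda", "list"].any
      (fun token => PySem.Str.isIn token value) then "bullet"
  else if ["table", "datatable", "grid"].any
      (fun token => PySem.Str.isIn token value) then "datatable"
  else if ["image", "visual", "hero", "figure", "photo", "chart"].any
      (fun token => PySem.Str.isIn token value) then "figure"
  else "summary"

-- ===== PORT B =====
-- TOKEN_PRIORITY (dict in insertion order) and ROLES from Source B
def pvTokens : List (List Char × Nat) :=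
  [("title".toList, 0), ("subtitle".toList, 1),
   ("bullet".toList, 2), ("body".toList, 2), ("points".toList, 2),
   ("summary".toList, 2), ("agenda".toList, 2), ("list".toList, 2),
   ("table".toList, 3), ("datatable".toList, 3), ("grid".toList, 3),
   ("image".toList, 4), ("visual".toList, 4), ("hero".toList, 4),
   ("figure".toList, 4), ("photo".toList, 4), ("chart".toList, 4)]

def pvRoles : List String := ["title", "subtitle", "bullet", "datatable", "figure", "summary"]

-- the inner 'for tok, p in TOKEN_PRIORITY.items(): if p < best and value.startswith(tok, i)'
-- (value.startswith(tok, i) is exactly tok <+: value.drop i since i < len(value))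
def pvInner (v : List Char) (i : Nat) (b : Nat) : Nat :=
  pvTokens.foldl (fun b tp => if tp.2 < b && tp.1.isPrefixOf (v.drop i) then tp.2 else b) b

def infer_slot_role_py_alt (slot_key : String) : String :=
  let value := PySem.Str.lower (if slot_key == "" then "" else slot_key)
  let v := value.toList
  -- for i in range(len(value)): … ; return ROLES[best]  (best ≤ 5 always, so getD is exact)
  let best := (List.range v.length).foldl (fun b i => pvInner v i b) 5
  pvRoles.getD best "summary"

-- ===== PRECONDITION & SPEC =====
def Spec_infer_slot_role_py (slot_key : String) (out : String) : Prop := out = infer_slot_role_py_alt slot_key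
instance (slot_key : String) (out : String) : Decidable (Spec_infer_slot_role_py slot_key out) := by unfold Spec_infer_slot_role_py; infer_instance

-- ===== CLAIM (what is proved, stated in full; the proofs are below) =====
def Claim_equal_infer_slot_role_py : Prop := ∀ (slot_key : String), Dom_infer_slot_role_py slot_key → Spec_infer_slot_role_py slot_key (infer_slot_role_py slot_key)

-- ===== LEMMAS AND PROOFS =====

-- characterization of the inner min-fold over an arbitrary token list
lemma pvInnerMin (v : List Char) (i : Nat) :
    ∀ (L : List (List Char × Nat)) (b : Nat),
      (L.foldl (fun b tp => if tp.2 < b && tp.1.isPrefixOf (v.drop i) then tp.2 else b) b) ≤ b ∧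
      ((L.foldl (fun b tp => if tp.2 < b && tp.1.isPrefixOf (v.drop i) then tp.2 else b) b) = b ∨
        ∃ tp ∈ L, tp.1.isPrefixOf (v.drop i) = true ∧
          (L.foldl (fun b tp => if tp.2 < b && tp.1.isPrefixOf (v.drop i) then tp.2 else b) b) = tp.2) ∧
      (∀ tp ∈ L, tp.1.isPrefixOf (v.drop i) = true →
        (L.foldl (fun b tp => if tp.2 < b && tp.1.isPrefixOf (v.drop i) then tp.2 else b) b) ≤ tp.2) := by
  intro L
  induction L with
  | nil => intro b; simp
  | cons tp rest ih =>
    intro b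
    cases hcond : (decide (tp.2 < b) && tp.1.isPrefixOf (v.drop i)) with
    | true =>
      have hboth := hcond
      rw [Bool.and_eq_true] at hboth
      have hlt : tp.2 < b := by simpa using hboth.1
      have hpf : tp.1.isPrefixOf (v.drop i) = true := hboth.2
      simp only [List.foldl_cons, hcond, if_true]
      obtain ⟨ih1, ih2, ih3⟩ := ih tp.2
      refine ⟨by omega, ?_, ?_⟩
      · rcases ih2 with h | ⟨tq, hq, hp, he⟩
        · exact Or.inr ⟨tp, by simp, hpf, h⟩
        · exact Or.inr ⟨tq, by simp [hq], hp, he⟩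
      · intro tq hq hp
        rcases List.mem_cons.mp hq with rfl | hq'
        · omega
        · exact ih3 tq hq' hp
    | false =>
      simp only [List.foldl_cons, hcond, Bool.false_eq_true, if_false]
      obtain ⟨ih1, ih2, ih3⟩ := ih b
      refine ⟨ih1, ?_, ?_⟩
      · rcases ih2 with h | ⟨tq, hq, hp, he⟩
        · exact Or.inl h
        · exact Or.inr ⟨tq, by simp [hq], hp, he⟩
      · intro tq hq hp
        rcases List.mem_cons.mp hq with rfl | hq'
        · have := Bool.and_eq_false_iff.mp hcond
          rcases this with h | h
          · have : ¬ tq.2 < b := by simpa using h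
            omega
          · rw [hp] at h; exact absurd h (by simp)
        · exact ih3 tq hq' hp

-- characterization of the outer fold over the positions
lemma pvOuterMin (v : List Char) :
    ∀ (idxs : List Nat) (b : Nat),
      (idxs.foldl (fun b i => pvInner v i b) b) ≤ b ∧
      ((idxs.foldl (fun b i => pvInner v i b) b) = b ∨
        ∃ i ∈ idxs, ∃ tp ∈ pvTokens, tp.1.isPrefixOf (v.drop i) = true ∧
          (idxs.foldl (fun b i => pvInner v i b) b) = tp.2) ∧
      (∀ i ∈ idxs, ∀ tp ∈ pvTokens, tp.1.isPrefixOf (v.drop i) = true →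
        (idxs.foldl (fun b i => pvInner v i b) b) ≤ tp.2) := by
  intro idxs
  induction idxs with
  | nil => intro b; simp
  | cons i rest ih =>
    intro b
    simp only [List.foldl_cons]
    obtain ⟨ih1, ih2, ih3⟩ := ih (pvInner v i b)
    obtain ⟨in1, in2, in3⟩ := pvInnerMin v i pvTokens b
    refine ⟨le_trans ih1 in1, ?_, ?_⟩
    · rcases ih2 with h | ⟨j, hj, tq, hq, hp, he⟩
      · rw [h]
        rcases in2 with h' | ⟨tq, hq, hp, he⟩
        · exact Or.inl h'
        · exact Or.inr ⟨i, by simp, tq, hq, hp, he⟩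
      · exact Or.inr ⟨j, by simp [hj], tq, hq, hp, he⟩
    · intro j hj tq hq hp
      rcases List.mem_cons.mp hj with rfl | hj'
      · exact le_trans ih1 (in3 tq hq hp)
      · exact ih3 j hj' tq hq hp

-- a nonempty token matches at some position i < |v| iff it is an infix of v
lemma pvOcc_iff (v tok : List Char) (h : tok ≠ []) :
    (∃ i ∈ List.range v.length, tok.isPrefixOf (v.drop i) = true) ↔ tok <:+: v := by
  constructor
  · rintro ⟨i, _, hpref⟩
    have hp : tok <+: v.drop i := by simpa using hpref
    exact List.infix_iff_prefix_suffix.mpr ⟨v.drop i, hp, List.drop_suffix i v⟩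
  · rintro ⟨s, t, rfl⟩
    refine ⟨s.length, ?_, ?_⟩
    · have : tok.length ≠ 0 := by simpa using h
      simp [List.mem_range]
      omega
    · have hd : (s ++ tok ++ t).drop s.length = tok ++ t := by
        rw [List.append_assoc]
        exact List.drop_left
      rw [hd]
      simp

-- the heart of the proof: A's cascade equals B's minimum-priority scan, for any value string
set_option maxHeartbeats 1600000 in
lemma pvMain (value : String) :
    (if PySem.Str.isIn "title" value then "title"
     else if PySem.Str.isIn "subtitle" value then "subtitle"
     else if ["bullet", "body", "points", "summary", "agenda", "list"].any
         (fun token => PySem.Str.isIn token value) then "bullet"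
     else if ["table", "datatable", "grid"].any
         (fun token => PySem.Str.isIn token value) then "datatable"
     else if ["image", "visual", "hero", "figure", "photo", "chart"].any
         (fun token => PySem.Str.isIn token value) then "figure"
     else "summary")
    = pvRoles.getD ((List.range value.toList.length).foldl
        (fun b i => pvInner value.toList i b) 5) "summary" := by
  set v := value.toList with hvl
  obtain ⟨hle, hcase, hbound⟩ := pvOuterMin v (List.range v.length) 5
  set R := (List.range v.length).foldl (fun b i => pvInner v i b) 5 with hR
  have hocc : ∀ (tok : List Char) (p : Nat), (tok, p) ∈ pvTokens → tok <:+: v → R ≤ p := by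
    intro tok p hmem hinf
    have hne : tok ≠ [] := by
      fin_cases hmem <;> decide
    obtain ⟨i, hi, hpref⟩ := (pvOcc_iff v tok hne).mpr hinf
    exact hbound i hi (tok, p) hmem hpref
  have hform : R = 5 ∨ ∃ tp ∈ pvTokens, tp.1 <:+: v ∧ R = tp.2 := by
    rcases hcase with h | ⟨i, hi, tp, htp, hpref, he⟩
    · exact Or.inl h
    · refine Or.inr ⟨tp, htp, ?_, he⟩
      have hp : tp.1 <+: v.drop i := by simpa using hpref
      exact List.infix_iff_prefix_suffix.mpr ⟨v.drop i, hp, List.drop_suffix i v⟩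
  have hni : ∀ (t : String), ¬ PySem.Str.isIn t value = true → ¬ (t.toList <:+: v) := by
    intro t hf hinf
    exact hf ((PySem.Str.isIn_iff_infix _ _).mpr (by simpa [hvl] using hinf))
  by_cases h0 : ("title".toList <:+: v)
  · -- title occurs: both sides return "title"
    have hA : PySem.Str.isIn "title" value = true :=
      (PySem.Str.isIn_iff_infix _ _).mpr (by simpa [hvl] using h0)
    have hR0 : R = 0 := by
      have := hocc "title".toList 0 (by simp [pvTokens]) h0
      omega
    rw [hR0, hA]
    rfl
  · have hA0 : PySem.Str.isIn "title" value = false := by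
      rw [Bool.eq_false_iff]
      exact fun h => h0 (by simpa [hvl] using (PySem.Str.isIn_iff_infix _ _).mp h)
    have h1 : ¬ ("subtitle".toList <:+: v) :=
      fun h => h0 (List.IsInfix.trans (by decide) h)
    have hA1 : PySem.Str.isIn "subtitle" value = false := by
      rw [Bool.eq_false_iff]
      exact fun h => h1 (by simpa [hvl] using (PySem.Str.isIn_iff_infix _ _).mp h)
    rw [hA0, hA1]
    simp only [Bool.false_eq_true, if_false]
    cases hB : (["bullet", "body", "points", "summary", "agenda", "list"].any
        (fun token => PySem.Str.isIn token value)) with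
    | true =>
      have hR2 : R = 2 := by
        obtain ⟨token, htok, hisin⟩ := List.any_eq_true.mp hB
        have hinf : token.toList <:+: v := by simpa [hvl] using (PySem.Str.isIn_iff_infix _ _).mp hisin
        have hle2 : R ≤ 2 := by
          fin_cases htok <;> exact hocc _ 2 (by simp [pvTokens]) hinf
        rcases hform with h5 | ⟨tp, htp, hinf', hRe⟩
        · omega
        · fin_cases htp <;> dsimp only at hinf' hRe <;>
            first
              | omega
              | exact absurd hinf' h0
              | exact absurd hinf' h1
      rw [hR2]
      rfl
    | false =>
      have hBf := List.any_eq_false.mp hB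
      have nb1 := hni "bullet" (hBf "bullet" (by simp))
      have nb2 := hni "body" (hBf "body" (by simp))
      have nb3 := hni "points" (hBf "points" (by simp))
      have nb4 := hni "summary" (hBf "summary" (by simp))
      have nb5 := hni "agenda" (hBf "agenda" (by simp))
      have nb6 := hni "list" (hBf "list" (by simp))
      simp only [Bool.false_eq_true, if_false]
      cases hT : (["table", "datatable", "grid"].any
          (fun token => PySem.Str.isIn token value)) with
      | true =>
        have hR3 : R = 3 := by
          obtain ⟨token, htok, hisin⟩ := List.any_eq_true.mp hT
          have hinf : token.toList <:+: v := by simpa [hvl] using (PySem.Str.isIn_iff_infix _ _).mp hisin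
          have hle3 : R ≤ 3 := by
            fin_cases htok <;> exact hocc _ 3 (by simp [pvTokens]) hinf
          rcases hform with h5 | ⟨tp, htp, hinf', hRe⟩
          · omega
          · fin_cases htp <;> dsimp only at hinf' hRe <;>
              first
                | omega
                | exact absurd hinf' h0
                | exact absurd hinf' h1
                | exact absurd hinf' nb1
                | exact absurd hinf' nb2
                | exact absurd hinf' nb3
                | exact absurd hinf' nb4
                | exact absurd hinf' nb5
                | exact absurd hinf' nb6
        rw [hR3]
        rfl
      | false =>
        have hTf := List.any_eq_false.mp hT
        have nt1 := hni "table" (hTf "table" (by simp))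
        have nt2 := hni "datatable" (hTf "datatable" (by simp))
        have nt3 := hni "grid" (hTf "grid" (by simp))
        simp only [Bool.false_eq_true, if_false]
        cases hF : (["image", "visual", "hero", "figure", "photo", "chart"].any
            (fun token => PySem.Str.isIn token value)) with
        | true =>
          have hR4 : R = 4 := by
            obtain ⟨token, htok, hisin⟩ := List.any_eq_true.mp hF
            have hinf : token.toList <:+: v := by
              simpa [hvl] using (PySem.Str.isIn_iff_infix _ _).mp hisin
            have hle4 : R ≤ 4 := by
              fin_cases htok <;> exact hocc _ 4 (by simp [pvTokens]) hinf
            rcases hform with h5 | ⟨tp, htp, hinf', hRe⟩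
            · omega
            · fin_cases htp <;> dsimp only at hinf' hRe <;>
                first
                  | omega
                  | exact absurd hinf' h0
                  | exact absurd hinf' h1
                  | exact absurd hinf' nb1
                  | exact absurd hinf' nb2
                  | exact absurd hinf' nb3
                  | exact absurd hinf' nb4
                  | exact absurd hinf' nb5
                  | exact absurd hinf' nb6
                  | exact absurd hinf' nt1
                  | exact absurd hinf' nt2
                  | exact absurd hinf' nt3
          rw [hR4]
          rfl
        | false =>
          have hFf := List.any_eq_false.mp hF
          have nf1 := hni "image" (hFf "image" (by simp))
          have nf2 := hni "visual" (hFf "visual" (by simp))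
          have nf3 := hni "hero" (hFf "hero" (by simp))
          have nf4 := hni "figure" (hFf "figure" (by simp))
          have nf5 := hni "photo" (hFf "photo" (by simp))
          have nf6 := hni "chart" (hFf "chart" (by simp))
          have hR5 : R = 5 := by
            rcases hform with h5 | ⟨tp, htp, hinf', hRe⟩
            · exact h5
            · fin_cases htp <;> dsimp only at hinf' <;>
                first
                  | exact absurd hinf' h0
                  | exact absurd hinf' h1
                  | exact absurd hinf' nb1
                  | exact absurd hinf' nb2
                  | exact absurd hinf' nb3
                  | exact absurd hinf' nb4
                  | exact absurd hinf' nb5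
                  | exact absurd hinf' nb6
                  | exact absurd hinf' nt1
                  | exact absurd hinf' nt2
                  | exact absurd hinf' nt3
                  | exact absurd hinf' nf1
                  | exact absurd hinf' nf2
                  | exact absurd hinf' nf3
                  | exact absurd hinf' nf4
                  | exact absurd hinf' nf5
                  | exact absurd hinf' nf6
          rw [hR5]
          rfl

-- ===== VERDICT (by name: the statement is the Claim_ definition above) =====
theorem infer_slot_role_py_spec : Claim_equal_infer_slot_role_py := by
  intro slot_key _
  exact pvMain (PySem.Str.lower (if slot_key == "" then "" else slot_key))
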